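-- pv_equiv track=rewrite | github.com/anujkhare/algorithms | solutions/strict_numbers.py | _count_strict_numbers_helper
-- ===== SOURCE A (Python) =====
-- MOD = 100007
--
-- def _count_strict_numbers_helper(num_digits, last_digit):
--     if num_digits == 0:
--         return 0
--
--     # because of the way we're calling recursively
--     if last_digit == -1 or last_digit == 10:
--         return 0
--
--     # base case
--     if num_digits == 1:
--         if last_digit == 0 or last_digit == 9:
--             return 1
--         return 2
--
--     sum = _count_strict_numbers_helper(num_digits - 1, last_digit + 1) % MOD + \
--         _count_strict_numbers_helper(num_digits - 1, last_digit - 1) % MOD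
--     return sum % MOD
-- ===== SOURCE B (Python) =====
-- MOD = 100007
--
-- def _count_strict_numbers_helper(num_digits, last_digit):
--     # Bottom-up DP over the window of digits reachable in num_digits-1 steps,
--     # instead of A's exponential branching recursion.
--     if num_digits == 0:
--         return 0
--     if last_digit == -1 or last_digit == 10:
--         return 0
--     lo = last_digit - (num_digits - 1)
--     hi = last_digit + (num_digits - 1)
--     vals = {d: (0 if (d == -1 or d == 10) else (1 if (d == 0 or d == 9) else 2))
--             for d in range(lo, hi + 1)}
--     for step in range(1, num_digits):
--         vals = {d: (0 if (d == -1 or d == 10)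
--                     else (vals[d + 1] % MOD + vals[d - 1] % MOD) % MOD)
--                 for d in range(lo + step, hi - step + 1)}
--     return vals[last_digit]
-- ===== Notes on version B (the rewrite author's own statement) =====
-- stated objective: faster
-- what changed: Replaced A's exponential two-way branching recursion by a bottom-up dynamic program over the shrinking window of reachable digits (one dict per level); intended as asymptotically faster — a timing run could not measure a ratio because A already timed out at num_digits=16 where B returned instantly.
import Mathlib
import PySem

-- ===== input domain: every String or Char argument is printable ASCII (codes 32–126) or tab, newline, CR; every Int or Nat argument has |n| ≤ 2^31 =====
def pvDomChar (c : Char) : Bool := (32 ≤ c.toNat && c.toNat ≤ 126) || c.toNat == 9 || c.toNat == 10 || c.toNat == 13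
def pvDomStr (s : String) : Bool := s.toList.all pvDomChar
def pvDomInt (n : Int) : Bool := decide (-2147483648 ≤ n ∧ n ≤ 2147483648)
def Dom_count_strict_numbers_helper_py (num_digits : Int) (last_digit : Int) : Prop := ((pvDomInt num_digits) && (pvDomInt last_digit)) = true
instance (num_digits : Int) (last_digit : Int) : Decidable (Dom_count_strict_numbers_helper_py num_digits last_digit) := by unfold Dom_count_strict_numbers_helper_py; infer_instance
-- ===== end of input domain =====

-- B replaces A's exponential branching recursion by a bottom-up DP over the window of
-- reachable digits; intended as faster (a timing run measured no ratio: A already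
-- timed out at num_digits=16 where B returned).


-- ===== PORT A =====
-- A's recursion, with a fuel guard making it total: under Pre_ (0 ≤ num_digits, or an
-- immediately-returning wall digit) fuel = num_digits.toNat is exactly enough.
def pyA : Nat → Int → Int → Int
  | 0, n, d =>
    if n = 0 then 0
    else if d = -1 ∨ d = 10 then 0
    else if n = 1 then (if d = 0 ∨ d = 9 then 1 else 2)
    else 0   -- unreachable with fuel = num_digits.toNat under Pre_
  | (f + 1), n, d =>
    if n = 0 then 0
    else if d = -1 ∨ d = 10 then 0
    else if n = 1 then (if d = 0 ∨ d = 9 then 1 else 2)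
    else
      PySem.Int.mod (PySem.Int.mod (pyA f (n - 1) (d + 1)) 100007 +
        PySem.Int.mod (pyA f (n - 1) (d - 1)) 100007) 100007

def count_strict_numbers_helper_py (num_digits : Int) (last_digit : Int) : Int :=
  pyA num_digits.toNat num_digits last_digit

-- ===== PORT B =====
-- level-1 values (the dict comprehension's base values in Source B)
def bBase (d : Int) : Int :=
  if d = -1 ∨ d = 10 then 0 else if d = 0 ∨ d = 9 then 1 else 2

-- one entry of the next level's dict comprehension (vals[d±1] is total here: the key is
-- always present, the comprehension range shrinks by one on each side per step)
def bLevel (vals : PySem.Dict Int Int) (d : Int) : Int :=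
  if d = -1 ∨ d = 10 then 0
  else PySem.Int.mod (PySem.Int.mod (vals.getD (d + 1) 0) 100007 +
    PySem.Int.mod (vals.getD (d - 1) 0) 100007) 100007

-- {d: g(d) for d in range(a, b)}
def bDict (g : Int → Int) (a b : Int) : PySem.Dict Int Int :=
  (PySem.List.pyRange a b 1).foldl (fun acc d => acc.insert d (g d)) PySem.Dict.empty

def count_strict_numbers_helper_py_alt (num_digits : Int) (last_digit : Int) : Int :=
  if num_digits = 0 then 0
  else if last_digit = -1 ∨ last_digit = 10 then 0
  else
    let lo := last_digit - (num_digits - 1)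
    let hi := last_digit + (num_digits - 1)
    let vals0 := bDict bBase lo (hi + 1)
    let vals := (PySem.List.pyRange 1 num_digits 1).foldl
      (fun vals step => bDict (bLevel vals) (lo + step) (hi - step + 1)) vals0
    vals.getD last_digit 0   -- vals[last_digit]; key always present under Pre_

-- ===== PRECONDITION & SPEC =====
-- Pre_ excludes (apart from the immediately-returning wall digits -1/10) negative
-- num_digits, where A's recursion never reaches a base case and raises RecursionError,
-- and num_digits ≥ 9900, where A's depth-num_digits recursion overflows the
-- interpreter's recursion limit (10000 in the test harness) and raises RecursionError —
-- just below that limit A's 2^num_digits-call recursion cannot feasibly be evaluated,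
-- so 9900 is margin for the caller's stack frames, not a feasibility cap.
def Pre_count_strict_numbers_helper_py (num_digits : Int) (last_digit : Int) : Prop :=
  (0 ≤ num_digits ∧ num_digits < 9900) ∨ last_digit = -1 ∨ last_digit = 10
instance (num_digits : Int) (last_digit : Int) : Decidable (Pre_count_strict_numbers_helper_py num_digits last_digit) := by unfold Pre_count_strict_numbers_helper_py; infer_instance

def pvWitness_count_strict_numbers_helper_py : Int × Int := (3, 5)

def Spec_count_strict_numbers_helper_py (num_digits : Int) (last_digit : Int) (out : Int) : Prop := out = count_strict_numbers_helper_py_alt num_digits last_digit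
instance (num_digits : Int) (last_digit : Int) (out : Int) : Decidable (Spec_count_strict_numbers_helper_py num_digits last_digit out) := by unfold Spec_count_strict_numbers_helper_py; infer_instance

-- ===== CLAIM (what is proved, stated in full; the proofs are below) =====
def Claim_equal_count_strict_numbers_helper_py : Prop := ∀ (num_digits : Int) (last_digit : Int), Dom_count_strict_numbers_helper_py num_digits last_digit → Pre_count_strict_numbers_helper_py num_digits last_digit → Spec_count_strict_numbers_helper_py num_digits last_digit (count_strict_numbers_helper_py num_digits last_digit)

-- ===== LEMMAS AND PROOFS =====

-- the common value: level function of the recursion (proof-side only)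
def specL : Nat → Int → Int
  | 0, _ => 0
  | 1, d => if d = -1 ∨ d = 10 then 0 else if d = 0 ∨ d = 9 then 1 else 2
  | (k + 2), d =>
    if d = -1 ∨ d = 10 then 0
    else PySem.Int.mod (PySem.Int.mod (specL (k + 1) (d + 1)) 100007 +
      PySem.Int.mod (specL (k + 1) (d - 1)) 100007) 100007

lemma pyA_wall (fuel : Nat) (n d : Int) (hw : d = -1 ∨ d = 10) : pyA fuel n d = 0 := by
  cases fuel <;> simp [pyA, hw]

lemma pyA_spec : ∀ (fuel m : Nat) (d : Int), m ≤ fuel → pyA fuel (m : Int) d = specL m d := by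
  intro fuel
  induction fuel with
  | zero =>
    intro m d hm
    interval_cases m
    cases hw : decide (d = -1 ∨ d = 10) <;> simp_all [pyA, specL]
  | succ f ih =>
    intro m d hm
    match m with
    | 0 => simp [pyA, specL]
    | 1 =>
      by_cases hw : d = -1 ∨ d = 10 <;> simp [pyA, specL, hw]
    | (k + 2) =>
      have h0 : ((k + 2 : Nat) : Int) ≠ 0 := by push_cast; omega
      have h1 : ((k + 2 : Nat) : Int) ≠ 1 := by push_cast; omega
      have harg : ((k + 2 : Nat) : Int) - 1 = ((k + 1 : Nat) : Int) := by push_cast; ring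
      by_cases hw : d = -1 ∨ d = 10
      · rw [pyA_wall _ _ _ hw, specL, if_pos hw]
      · rw [pyA, if_neg h0, if_neg hw, if_neg h1, harg,
          ih (k + 1) (d + 1) (by omega), ih (k + 1) (d - 1) (by omega),
          specL, if_neg hw]

lemma getD_foldl_insert_not_mem (l : List Int) (g : Int → Int)
    (dct : PySem.Dict Int Int) (k : Int) (h : k ∉ l) :
    (l.foldl (fun acc d => acc.insert d (g d)) dct).getD k 0 = dct.getD k 0 := by
  induction l generalizing dct with
  | nil => rfl
  | cons x xs ih =>
    simp only [List.foldl_cons]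
    rw [ih _ (fun hk => h (List.mem_cons_of_mem _ hk)), PySem.Dict.getD_insert]
    exact if_neg (by rintro rfl; exact h List.mem_cons_self)

lemma getD_foldl_range_ins (g : Int → Int) :
    ∀ (t : Nat) (a : Int) (dct : PySem.Dict Int Int) (k : Int),
      a ≤ k → k < a + t →
      ((PySem.List.pyRange a (a + t) 1).foldl (fun acc d => acc.insert d (g d)) dct).getD k 0
        = g k := by
  intro t
  induction t with
  | zero => intro a dct k h1 h2; omega
  | succ t ih =>
    intro a dct k h1 h2
    push_cast
    rw [PySem.List.pyRange_one_cons (by omega : a < a + ((t : Int) + 1))]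
    simp only [List.foldl_cons]
    by_cases hk : k = a
    · subst hk
      rw [getD_foldl_insert_not_mem _ g _ k
          (by intro hmem; rw [PySem.List.mem_pyRange_one] at hmem; omega),
        PySem.Dict.getD_insert_self]
    · have : a + ((t : Int) + 1) = (a + 1) + (t : Int) := by ring
      rw [this]
      exact ih (a + 1) _ k (by omega) (by omega)

lemma getD_bDict (g : Int → Int) (a b k : Int) (h1 : a ≤ k) (h2 : k < b) :
    (bDict g a b).getD k 0 = g k := by
  have hb : b = a + ((b - a).toNat : Int) := by omega
  rw [bDict, hb]
  exact getD_foldl_range_ins g _ a _ k h1 (by omega)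

lemma loopB (lo hi : Int) :
    ∀ (t j : Nat) (vals : PySem.Dict Int Int),
      (∀ e : Int, lo + j ≤ e → e ≤ hi - j → vals.getD e 0 = specL (j + 1) e) →
      ∀ e : Int, lo + j + t ≤ e → e ≤ hi - j - t →
        ((PySem.List.pyRange ((j : Int) + 1) ((j : Int) + 1 + t) 1).foldl
          (fun vals step => bDict (bLevel vals) (lo + step) (hi - step + 1)) vals).getD e 0
          = specL (j + 1 + t) e := by
  intro t
  induction t with
  | zero =>
    intro j vals hinv e he1 he2
    rw [PySem.List.pyRange_one_eq_nil (by omega)]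
    exact hinv e (by omega) (by omega)
  | succ t ih =>
    intro j vals hinv e he1 he2
    push_cast
    rw [PySem.List.pyRange_one_cons (by omega : (j : Int) + 1 < (j : Int) + 1 + ((t : Int) + 1))]
    simp only [List.foldl_cons]
    have hinv' : ∀ e : Int, lo + ((j + 1 : Nat) : Int) ≤ e → e ≤ hi - ((j + 1 : Nat) : Int) →
        (bDict (bLevel vals) (lo + ((j : Int) + 1)) (hi - ((j : Int) + 1) + 1)).getD e 0
          = specL ((j + 1) + 1) e := by
      intro e he1 he2
      push_cast at he1 he2
      rw [getD_bDict _ _ _ _ (by omega) (by omega)]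
      show bLevel vals e = specL (j + 2) e
      by_cases hw : e = -1 ∨ e = 10
      · rw [bLevel, if_pos hw, specL, if_pos hw]
      · rw [bLevel, if_neg hw, specL, if_neg hw,
          hinv (e + 1) (by omega) (by omega), hinv (e - 1) (by omega) (by omega)]
    have hrange : (PySem.List.pyRange ((j : Int) + 1 + 1) ((j : Int) + 1 + ((t : Int) + 1)) 1)
        = PySem.List.pyRange (((j + 1 : Nat) : Int) + 1) (((j + 1 : Nat) : Int) + 1 + (t : Int)) 1 := by
      congr 1 <;> push_cast <;> ring
    have hlev : (j + 1) + 1 + t = j + 1 + (t + 1) := by omega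
    rw [hrange, ← hlev]
    exact ih (j + 1) _ hinv' e (by push_cast; omega) (by push_cast; omega)

-- ===== VERDICT (by name: the statement is the Claim_ definition above) =====
theorem count_strict_numbers_helper_py_spec : Claim_equal_count_strict_numbers_helper_py := by
  unfold Claim_equal_count_strict_numbers_helper_py
  intro n d _ hPre
  unfold Spec_count_strict_numbers_helper_py
  unfold count_strict_numbers_helper_py count_strict_numbers_helper_py_alt
  by_cases hw : d = -1 ∨ d = 10
  · rw [pyA_wall _ _ _ hw]
    by_cases hn : n = 0 <;> simp [hn, hw]
  · have h0 : 0 ≤ n := by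
      rcases hPre with ⟨h, _⟩ | h | h
      · exact h
      · exact absurd (Or.inl h) hw
      · exact absurd (Or.inr h) hw
    by_cases hn : n = 0
    · subst hn; simp [pyA]
    · have hm1 : 1 ≤ n.toNat := by omega
      obtain ⟨t, ht⟩ : ∃ t : Nat, n.toNat = t + 1 := ⟨n.toNat - 1, by omega⟩
      have hn' : n = ((t + 1 : Nat) : Int) := by omega
      rw [if_neg hn, if_neg hw]
      rw [show pyA n.toNat n d = specL n.toNat d from by
        rw [ht, hn']; exact pyA_spec (t + 1) (t + 1) d (le_refl _)]
      simp only []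
      have hinv0 : ∀ e : Int, (d - (n - 1)) + ((0 : Nat) : Int) ≤ e →
          e ≤ (d + (n - 1)) - ((0 : Nat) : Int) →
          (bDict bBase (d - (n - 1)) ((d + (n - 1)) + 1)).getD e 0 = specL (0 + 1) e := by
        intro e he1 he2
        push_cast at he1 he2
        rw [getD_bDict _ _ _ _ (by omega) (by omega)]
        rfl
      have hrange : PySem.List.pyRange 1 n 1
          = PySem.List.pyRange (((0 : Nat) : Int) + 1) (((0 : Nat) : Int) + 1 + (t : Int)) 1 := by
        push_cast at hn'
        congr 1 <;> push_cast <;> omega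
      rw [hrange]
      have := loopB (d - (n - 1)) (d + (n - 1)) t 0 _ hinv0 d
        (by push_cast; omega) (by push_cast; omega)
      rw [this, show 0 + 1 + t = n.toNat from by omega]
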